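-- pv_equiv track=rewrite | github.com/yazhsab/qbitel-bridge | ai_engine/translation/protocol_bridge/protocol_bridge.py | _are_compatible_types
-- ===== SOURCE A (Python) =====
-- def _are_compatible_types(type1: str, type2: str) -> bool:
--     """Check if two field types are compatible for translation."""
--     compatible_groups = [
--         {"integer", "length"},
--         {"string", "binary"},
--         {"timestamp", "integer"},
--         {"address", "string"}
--     ]
--
--     for group in compatible_groups:
--         if type1 in group and type2 in group:
--             return True
--
--     return False
-- ===== SOURCE B (Python) =====
-- def _are_compatible_types(type1: str, type2: str) -> bool:
--     """Check if two field types are compatible for translation."""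
--     compatible_groups = [
--         ["integer", "length"],
--         ["string", "binary"],
--         ["timestamp", "integer"],
--         ["address", "string"],
--     ]
--     adj = {}
--     for group in compatible_groups:
--         for t in group:
--             adj.setdefault(t, set()).update(group)
--     return type2 in adj.get(type1, set())
-- ===== Notes on version B (the rewrite author's own statement) =====
-- stated objective: idiomatic
-- what changed: B builds an adjacency dict (type -> union of all groups containing it) in one pass over the groups, then answers with a single dict lookup plus set membership, instead of A's per-call scan testing both types against every group.
import Mathlib
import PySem

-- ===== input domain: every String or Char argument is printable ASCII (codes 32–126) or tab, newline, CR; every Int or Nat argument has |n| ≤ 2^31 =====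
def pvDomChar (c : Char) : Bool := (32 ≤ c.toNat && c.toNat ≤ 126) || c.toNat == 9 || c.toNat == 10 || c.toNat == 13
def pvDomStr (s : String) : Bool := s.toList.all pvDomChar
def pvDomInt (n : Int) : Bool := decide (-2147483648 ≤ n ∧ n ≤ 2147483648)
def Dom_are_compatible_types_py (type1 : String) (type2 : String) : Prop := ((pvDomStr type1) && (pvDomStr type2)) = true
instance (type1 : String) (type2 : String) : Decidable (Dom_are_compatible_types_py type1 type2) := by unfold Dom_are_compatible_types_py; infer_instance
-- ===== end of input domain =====

-- B replaces A's per-call scan over the group list by a precomputed adjacency index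
-- (type -> union of all groups containing it) consulted with a single lookup (idiomatic restructuring).


-- ===== PORT A =====
-- A's compatible_groups: a list of Python sets
def aGroups : List (PySem.Set String) :=
  [PySem.Set.ofList ["integer", "length"],
   PySem.Set.ofList ["string", "binary"],
   PySem.Set.ofList ["timestamp", "integer"],
   PySem.Set.ofList ["address", "string"]]

-- 'for group in …: if type1 in group and type2 in group: return True' / 'return False' = any over the list
def are_compatible_types_py (type1 : String) (type2 : String) : Bool :=
  aGroups.any (fun g => PySem.Set.contains g type1 && PySem.Set.contains g type2)

-- ===== PORT B =====
def altGroups : List (List String) :=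
  [["integer", "length"], ["string", "binary"], ["timestamp", "integer"], ["address", "string"]]

-- 'adj.setdefault(t, set()).update(group)' = modify at t with default empty set, Set.update by the group
def altAdj : PySem.Dict String (PySem.Set String) :=
  altGroups.foldl
    (fun adj g => g.foldl
      (fun adj t => adj.modify t PySem.Set.empty (fun s => PySem.Set.update s g)) adj)
    PySem.Dict.empty

-- 'return type2 in adj.get(type1, set())'
def are_compatible_types_py_alt (type1 : String) (type2 : String) : Bool :=
  PySem.Set.contains (altAdj.getD type1 PySem.Set.empty) type2

-- ===== PRECONDITION & SPEC =====
def Spec_are_compatible_types_py (type1 : String) (type2 : String) (out : Bool) : Prop := out = are_compatible_types_py_alt type1 type2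
instance (type1 : String) (type2 : String) (out : Bool) : Decidable (Spec_are_compatible_types_py type1 type2 out) := by unfold Spec_are_compatible_types_py; infer_instance

-- ===== CLAIM (what is proved, stated in full; the proofs are below) =====
def Claim_equal_are_compatible_types_py : Prop := ∀ (type1 : String) (type2 : String), Dom_are_compatible_types_py type1 type2 → Spec_are_compatible_types_py type1 type2 (are_compatible_types_py type1 type2)

-- ===== LEMMAS AND PROOFS =====

-- the literal value of B's adjacency index
def adjLit : PySem.Dict String (PySem.Set String) := PySem.Dict.mk
    [("integer", ["integer", "length", "timestamp"]),
     ("length", ["integer", "length"]),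
     ("string", ["string", "binary", "address"]),
     ("binary", ["string", "binary"]),
     ("timestamp", ["timestamp", "integer"]),
     ("address", ["address", "string"])]

set_option maxHeartbeats 1000000 in
theorem altAdj_eq : altAdj = adjLit := by rfl

-- A returns true iff some group contains both types
theorem A_iff (t1 t2 : String) : are_compatible_types_py t1 t2 = true ↔ ∃ g ∈ aGroups, t1 ∈ g ∧ t2 ∈ g := by
  simp [are_compatible_types_py]

-- case split: t1 is one of the six indexed type names (lookup evaluates), or none (lookup is empty)
theorem ports_agree (t1 t2 : String) :
    are_compatible_types_py t1 t2 = are_compatible_types_py_alt t1 t2 := by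
  have hB : are_compatible_types_py_alt t1 t2
      = PySem.Set.contains (adjLit.getD t1 PySem.Set.empty) t2 := by
    rw [are_compatible_types_py_alt, altAdj_eq]
  rw [Bool.eq_iff_iff, A_iff, hB, PySem.Set.contains_iff]
  by_cases hk : t1 = "integer" ∨ t1 = "length" ∨ t1 = "string" ∨ t1 = "binary" ∨ t1 = "timestamp" ∨ t1 = "address"
  · rcases hk with h | h | h | h | h | h <;> subst h <;>
      simp [adjLit, aGroups, PySem.Set.ofList, PySem.Dict.getD, PySem.Dict.get?, List.find?] <;>
      tauto
  · push_neg at hk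
    obtain ⟨h1, h2, h3, h4, h5, h6⟩ := hk
    have g1 : (("integer" : String) == t1) = false := beq_eq_false_iff_ne.mpr (Ne.symm h1)
    have g2 : (("length" : String) == t1) = false := beq_eq_false_iff_ne.mpr (Ne.symm h2)
    have g3 : (("string" : String) == t1) = false := beq_eq_false_iff_ne.mpr (Ne.symm h3)
    have g4 : (("binary" : String) == t1) = false := beq_eq_false_iff_ne.mpr (Ne.symm h4)
    have g5 : (("timestamp" : String) == t1) = false := beq_eq_false_iff_ne.mpr (Ne.symm h5)
    have g6 : (("address" : String) == t1) = false := beq_eq_false_iff_ne.mpr (Ne.symm h6)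
    simp [adjLit, aGroups, PySem.Set.ofList, PySem.Dict.getD, PySem.Dict.get?, List.find?,
      g1, g2, g3, g4, g5, g6]
    simp_all

-- ===== VERDICT (by name: the statement is the Claim_ definition above) =====
theorem are_compatible_types_py_spec : Claim_equal_are_compatible_types_py := by
  intro t1 t2 _
  unfold Spec_are_compatible_types_py
  exact ports_agree t1 t2
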